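-- pv_equiv track=rewrite | github.com/pypi-data/pypi-mirror-370 | packages/reticulum/reticulum-0.2.2.tar.gz/reticulum-0.2.2/src/reticulum/path_consolidator.py | _get_highest_exposure_level
-- ===== SOURCE A (Python) =====
-- from typing import Dict, List, Any
--
-- def _get_highest_exposure_level(containers: List[Dict[str, Any]]) -> str:
--     """Get the highest exposure level from a list of containers."""
--     if not containers:
--         return "LOW"
--
--     # Priority: HIGH > MEDIUM > LOW
--     levels = [c.get("exposure_level", "LOW") for c in containers]
--
--     if "HIGH" in levels:
--         return "HIGH"
--     elif "MEDIUM" in levels: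
--         return "MEDIUM"
--     else:
--         return "LOW"
-- ===== SOURCE B (Python) =====
-- from typing import Dict, List, Any
--
-- def _get_highest_exposure_level(containers: List[Dict[str, Any]]) -> str:
--     """Get the highest exposure level from a list of containers (single pass, early exit)."""
--     seen_medium = False
--     for c in containers:
--         lvl = c.get("exposure_level", "LOW")
--         if lvl == "HIGH":
--             return "HIGH"
--         if lvl == "MEDIUM":
--             seen_medium = True
--     return "MEDIUM" if seen_medium else "LOW"
-- ===== Notes on version B (the rewrite author's own statement) =====
-- stated objective: alternative
-- what changed: Replaced the build-a-levels-list-then-two-membership-scans structure with a single pass that returns HIGH immediately and tracks a seen_medium flag.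
import Mathlib
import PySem

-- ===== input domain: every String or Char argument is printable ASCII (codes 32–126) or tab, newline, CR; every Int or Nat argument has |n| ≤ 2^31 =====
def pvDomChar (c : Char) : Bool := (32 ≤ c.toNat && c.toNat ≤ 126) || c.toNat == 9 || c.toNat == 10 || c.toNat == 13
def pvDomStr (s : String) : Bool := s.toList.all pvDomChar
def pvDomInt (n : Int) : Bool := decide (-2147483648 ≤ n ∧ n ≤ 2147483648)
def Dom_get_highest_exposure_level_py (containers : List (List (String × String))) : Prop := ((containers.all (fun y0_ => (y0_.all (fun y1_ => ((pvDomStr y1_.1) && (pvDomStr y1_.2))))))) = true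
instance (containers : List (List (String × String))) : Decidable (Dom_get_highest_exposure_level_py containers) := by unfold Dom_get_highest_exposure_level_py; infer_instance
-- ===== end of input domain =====

-- ===== PORT A =====
-- B also reads each container once via the same getter; equivalence is about the return value (no mutation in either).
def pvGetLvl (c : List (String × String)) : String :=
  (PySem.Dict.ofList c).getD "exposure_level" "LOW"

def get_highest_exposure_level_py (containers : List (List (String × String))) : String :=
  if containers = [] then "LOW"
  else
    let levels := containers.map pvGetLvl
    if levels.contains "HIGH" then "HIGH"
    else if levels.contains "MEDIUM" then "MEDIUM"
    else "LOW"

-- ===== PORT B =====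
-- single pass, early return on HIGH, seen_medium flag
def pvAltLoop (cs : List (List (String × String))) (seen_medium : Bool) : String :=
  match cs with
  | [] => if seen_medium then "MEDIUM" else "LOW"
  | c :: rest =>
    let lvl := pvGetLvl c
    if lvl = "HIGH" then "HIGH"
    else if lvl = "MEDIUM" then pvAltLoop rest true
    else pvAltLoop rest seen_medium

def get_highest_exposure_level_py_alt (containers : List (List (String × String))) : String :=
  pvAltLoop containers false

-- ===== PRECONDITION & SPEC =====
def Spec_get_highest_exposure_level_py (containers : List (List (String × String))) (out : String) : Prop := out = get_highest_exposure_level_py_alt containers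
instance (containers : List (List (String × String))) (out : String) : Decidable (Spec_get_highest_exposure_level_py containers out) := by unfold Spec_get_highest_exposure_level_py; infer_instance

-- ===== CLAIM (what is proved, stated in full; the proofs are below) =====
def Claim_equal_get_highest_exposure_level_py : Prop := ∀ (containers : List (List (String × String))), Dom_get_highest_exposure_level_py containers → Spec_get_highest_exposure_level_py containers (get_highest_exposure_level_py containers)

-- ===== LEMMAS AND PROOFS =====

-- ===== VERDICT (by name: the statement is the Claim_ definition above) =====
lemma pvAltLoop_char (cs : List (List (String × String))) (b : Bool) :
    pvAltLoop cs b =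
      if (cs.map pvGetLvl).contains "HIGH" then "HIGH"
      else if b || (cs.map pvGetLvl).contains "MEDIUM" then "MEDIUM"
      else "LOW" := by
  induction cs generalizing b with
  | nil => cases b <;> simp [pvAltLoop]
  | cons c rest ih =>
    simp only [pvAltLoop, List.map_cons, List.contains_cons]
    by_cases hH : pvGetLvl c = "HIGH"
    · simp [hH]
    · by_cases hM : pvGetLvl c = "MEDIUM"
      · simp [hH, hM, ih, beq_iff_eq, Ne.symm hH]
      · simp [ih, beq_iff_eq, Ne.symm hH, Ne.symm hM, hH, hM]

theorem get_highest_exposure_level_py_spec : Claim_equal_get_highest_exposure_level_py := by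
  intro containers _
  unfold Spec_get_highest_exposure_level_py get_highest_exposure_level_py get_highest_exposure_level_py_alt
  rw [pvAltLoop_char]
  cases containers <;> simp
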